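-- pv_equiv track=rewrite | github.com/cirosantilli/project-euler-solvers | solvers/678.py | count_e4_cubes_only
-- ===== SOURCE A (Python) =====
-- from collections import Counter
-- from typing import Dict, List, Tuple
--
-- def iroot(n: int, k: int) -> int:
--     """Floor integer k-th root of n (n>=0, k>=1)."""
--     if n < 2:
--         return n
--     x = int(round(n ** (1.0 / k)))
--     while (x + 1) ** k <= n:
--         x += 1
--     while x**k > n:
--         x -= 1
--     return x
--
-- def count_e4_cubes_only(N: int, mult: Counter, excluded: set) -> int:
--     """
--     Count e=4 solutions where RHS is a perfect cube, but the cube value is NOT in excluded.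
--     (In this solution, excluded is has_ge5 so we don't double-count.)
--
--     We find all (a,b) with a^4+b^4 being a perfect cube <= N using modular filtering.
--
--     Modulus choice:
--       M = 5*7*13*19 = 8645
--     This cuts candidate pairs drastically because only ~2.9% of sums of two 4th powers
--     can be cubic residues mod M.
--     """
--     L = iroot(N, 4)
--     if L < 2:
--         return 0
--
--     M = 8645  # 5*7*13*19
--
--     # cubes mod M
--     cube_bool = [False] * M
--     for i in range(M):
--         cube_bool[pow(i, 3, M)] = True
--
--     # Precompute b^4 and group b by residue r=b^4 mod M
--     b4 = [0] * (L + 1)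
--     res_to_bs: Dict[int, List[int]] = {}
--     present_rbs = set()
--     for b in range(1, L + 1):
--         v = b * b
--         v *= v  # b^4
--         b4[b] = v
--         r = v % M
--         res_to_bs.setdefault(r, []).append(b)
--         present_rbs.add(r)
--     present_rbs = sorted(present_rbs)
--
--     # Precompute a^4 and residue ra=a^4 mod M
--     a4 = [0] * (L + 1)
--     a_res = [0] * (L + 1)
--     r4_occ = set()
--     for a in range(1, L + 1):
--         v = a * a
--         v *= v  # a^4
--         a4[a] = v
--         r = v % M
--         a_res[a] = r
--         r4_occ.add(r)
--
--     # For each possible ra, flatten candidate b list that passes the mod filter.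
--     cand_b_by_ra: Dict[int, List[int]] = {}
--     for ra in r4_occ:
--         cand: List[int] = []
--         for rb in present_rbs:
--             if cube_bool[(ra + rb) % M]:
--                 cand.extend(res_to_bs[rb])
--         cand_b_by_ra[ra] = cand
--
--     total = 0
--     for a in range(1, L):
--         ra = a_res[a]
--         va = a4[a]
--         cand = cand_b_by_ra[ra]
--         for b in cand:
--             if b <= a:
--                 continue
--             s = va + b4[b]
--             if s > N:
--                 continue
--             c = iroot(s, 3)
--             if c * c * c == s and s not in excluded:
--                 total += mult.get(s, 0)
--
--     return total
-- ===== SOURCE B (Python) =====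
-- def iroot(n: int, k: int) -> int:
--     """Floor integer k-th root of n (n>=0, k>=1)."""
--     if n < 2:
--         return n
--     x = int(round(n ** (1.0 / k)))
--     while (x + 1) ** k <= n:
--         x += 1
--     while x**k > n:
--         x -= 1
--     return x
--
-- def count_e4_cubes_only(N, mult, excluded):
--     """Enumerate cubes s=c^3<=N; for each a with a^4<s test whether s-a^4 is a
--     perfect 4th power b^4 with b>a, and add mult.get(s,0) once per such pair."""
--     total = 0
--     for c in range(1, iroot(N, 3) + 1):
--         s = c * c * c
--         for a in range(1, iroot(s - 1, 4) + 1):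
--             rem = s - a ** 4
--             b = iroot(rem, 4)
--             if b > a and b ** 4 == rem and s not in excluded:
--                 total += mult.get(s, 0)
--     return total
-- ===== Notes on version B (the rewrite author's own statement) =====
-- stated objective: alternative
-- what changed: Instead of filtering all a^4+b^4 pairs through precomputed modular cubic-residue tables (mod 8645), residue-grouped dicts and an integer cube-root test on each surviving sum, B enumerates the cubes s=c^3<=N directly and for each a with a^4<s tests whether s-a^4 is an exact fourth power b^4 with b>a, so the residue tables, grouping dict and cube-root test disappear.
import Mathlib
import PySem

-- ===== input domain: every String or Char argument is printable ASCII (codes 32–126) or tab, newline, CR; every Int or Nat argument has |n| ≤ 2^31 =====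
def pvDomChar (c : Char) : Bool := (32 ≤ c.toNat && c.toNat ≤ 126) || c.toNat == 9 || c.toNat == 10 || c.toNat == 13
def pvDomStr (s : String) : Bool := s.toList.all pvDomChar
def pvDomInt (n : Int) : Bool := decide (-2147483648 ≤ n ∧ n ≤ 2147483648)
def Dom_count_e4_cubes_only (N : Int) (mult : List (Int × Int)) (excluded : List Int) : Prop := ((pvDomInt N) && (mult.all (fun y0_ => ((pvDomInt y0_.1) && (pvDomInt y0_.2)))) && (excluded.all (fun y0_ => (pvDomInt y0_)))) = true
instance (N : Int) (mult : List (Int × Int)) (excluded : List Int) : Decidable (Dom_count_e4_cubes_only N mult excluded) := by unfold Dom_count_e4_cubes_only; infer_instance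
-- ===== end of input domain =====

-- B replaces A's modular-residue filtering of a^4+b^4 pairs by a direct enumeration of the
-- cubes c^3 <= N with an exact fourth-power test on c^3 - a^4 (objective: alternative algorithm).

-- ===== PORT A =====
-- shared helper: Python's iroot seeds x with a float estimate and then corrects it with two
-- while loops; the returned value is the floor k-th root whatever the seed (for n >= 2, k >= 1),
-- so this port ascends from 0 — exact for the n < 2 short-circuit and for every n >= 2, k >= 1.
def irootAux (n : Int) (k : Nat) : Nat → Int → Int
  | 0, x => x
  | fuel + 1, x => if (x + 1) ^ k ≤ n then irootAux n k fuel (x + 1) else x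

def iroot (n : Int) (k : Nat) : Int :=
  if n < 2 then n else irootAux n k n.toNat 0

-- A's loops, one named helper per Python loop (faithful transliterations)
def aCubeBool : List Bool :=
  (PySem.List.pyRange 0 8645 1).foldl
    (fun cb i => PySem.List.pySetD cb (PySem.Int.powMod i 3 8645) true)
    (List.replicate 8645 false)

def aStB (L : Int) : List Int × PySem.Dict Int (List Int) × PySem.Set Int :=
  (PySem.List.pyRange 1 (L + 1) 1).foldl
    (fun st b =>
      let v := b * b
      let v := v * v
      let r := PySem.Int.mod v 8645
      (PySem.List.pySetD st.1 b v,
       st.2.1.modify r [] (fun bs => bs ++ [b]),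
       st.2.2.add r))
    (List.replicate (L + 1).toNat 0, PySem.Dict.empty, PySem.Set.empty)

def aStA (L : Int) : List Int × List Int × PySem.Set Int :=
  (PySem.List.pyRange 1 (L + 1) 1).foldl
    (fun st a =>
      let v := a * a
      let v := v * v
      let r := PySem.Int.mod v 8645
      (PySem.List.pySetD st.1 a v, PySem.List.pySetD st.2.1 a r, st.2.2.add r))
    (List.replicate (L + 1).toNat 0, List.replicate (L + 1).toNat 0, PySem.Set.empty)

def aCand (cube_bool : List Bool) (res_to_bs : PySem.Dict Int (List Int))
    (present : List Int) (ra : Int) : List Int :=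
  present.foldl
    (fun cand rb =>
      if PySem.List.pyGetD cube_bool (PySem.Int.mod (ra + rb) 8645) false then
        cand ++ res_to_bs.getD rb []
      else cand)
    []

def aCandDict (cube_bool : List Bool) (res_to_bs : PySem.Dict Int (List Int))
    (present : List Int) (r4occ : List Int) : PySem.Dict Int (List Int) :=
  r4occ.foldl (fun d ra => d.insert ra (aCand cube_bool res_to_bs present ra)) PySem.Dict.empty

def aTotal (N : Int) (mult : List (Int × Int)) (excluded : List Int)
    (a4 a_res b4 : List Int) (cand_dict : PySem.Dict Int (List Int)) (L : Int) : Int :=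
  (PySem.List.pyRange 1 L 1).foldl
    (fun total a =>
      let ra := PySem.List.pyGetD a_res a 0
      let va := PySem.List.pyGetD a4 a 0
      let cand := cand_dict.getD ra []
      cand.foldl
        (fun total b =>
          if b ≤ a then total
          else
            let s := va + PySem.List.pyGetD b4 b 0
            if s > N then total
            else
              let c := iroot s 3
              if c * c * c = s ∧ s ∉ excluded then total + (PySem.Dict.mk mult).getD s 0
              else total)
        total)
    0

def count_e4_cubes_only (N : Int) (mult : List (Int × Int)) (excluded : List Int) : Int :=
  let L := iroot N 4
  if L < 2 then 0
  else
    let cube_bool := aCubeBool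
    let stB := aStB L
    let b4 := stB.1
    let res_to_bs := stB.2.1
    let present_rbs := PySem.List.sorted (stB.2.2 : PySem.Set Int) (fun x => x) false
    let stA := aStA L
    -- 'for ra in r4_occ' iterates a Python set, but it only builds a dict that is looked
    -- up afterwards by key, so the (unmodelled) set iteration order cannot affect the result
    aTotal N mult excluded stA.1 stA.2.1 b4
      (aCandDict cube_bool res_to_bs present_rbs stA.2.2) L


-- ===== PORT B =====
def count_e4_cubes_only_alt (N : Int) (mult : List (Int × Int)) (excluded : List Int) : Int :=
  (PySem.List.pyRange 1 (iroot N 3 + 1) 1).foldl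
    (fun total c =>
      let s := c * c * c
      (PySem.List.pyRange 1 (iroot (s - 1) 4 + 1) 1).foldl
        (fun total a =>
          let rem := s - a ^ 4
          let b := iroot rem 4
          if b > a ∧ b ^ 4 = rem ∧ s ∉ excluded then total + (PySem.Dict.mk mult).getD s 0
          else total)
        total)
    0


-- ===== PRECONDITION & SPEC =====
def Spec_count_e4_cubes_only (N : Int) (mult : List (Int × Int)) (excluded : List Int) (out : Int) : Prop := out = count_e4_cubes_only_alt N mult excluded
instance (N : Int) (mult : List (Int × Int)) (excluded : List Int) (out : Int) : Decidable (Spec_count_e4_cubes_only N mult excluded out) := by unfold Spec_count_e4_cubes_only; infer_instance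

-- ===== CLAIM (what is proved, stated in full; the proofs are below) =====
def Claim_equal_count_e4_cubes_only : Prop := ∀ (N : Int) (mult : List (Int × Int)) (excluded : List Int), Dom_count_e4_cubes_only N mult excluded → Spec_count_e4_cubes_only N mult excluded (count_e4_cubes_only N mult excluded)

-- ===== LEMMAS AND PROOFS =====

lemma irootAux_spec (n : Int) (k : Nat) :
    ∀ (fuel : Nat) (x : Int), 0 ≤ x → x ^ k ≤ n → n < (x + fuel + 1) ^ k →
      0 ≤ irootAux n k fuel x ∧ (irootAux n k fuel x) ^ k ≤ n ∧ n < (irootAux n k fuel x + 1) ^ k := by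
  intro fuel
  induction fuel with
  | zero => intro x hx h1 h2; simpa [irootAux] using ⟨hx, h1, by simpa using h2⟩
  | succ f ih =>
    intro x hx h1 h2
    rw [irootAux]
    split
    · apply ih (x+1) (by omega) (by assumption)
      have : x + 1 + (f:Int) + 1 = x + (f+1:Nat) + 1 := by push_cast; ring
      rw [this]; exact h2
    · exact ⟨hx, h1, by omega⟩

lemma iroot_spec (n : Int) (k : Nat) (hn : 0 ≤ n) (hk : 1 ≤ k) :
    0 ≤ iroot n k ∧ (iroot n k) ^ k ≤ n ∧ n < (iroot n k + 1) ^ k := by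
  unfold iroot
  split
  · rename_i h
    have h01 : n = 0 ∨ n = 1 := by omega
    rcases h01 with h0 | h1
    · subst h0; refine ⟨le_refl _, by simp [zero_pow (by omega : k ≠ 0)], ?_⟩
      simpa using one_pos.trans_le (one_le_pow₀ (by omega : (1:Int) ≤ 1))
    · subst h1
      refine ⟨by omega, by simpa using one_le_pow₀ (by omega : (1:Int) ≤ 1), ?_⟩
      calc (1:Int) < 2 := by omega
        _ ≤ 2 ^ k := by simpa using le_self_pow₀ (by omega : (1:Int) ≤ 2) (by omega)
        _ = (1 + 1) ^ k := by norm_num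
  · rename_i h
    apply irootAux_spec n k n.toNat 0 le_rfl
    · simpa [zero_pow (by omega : k ≠ 0)] using hn
    · have : (0:Int) + n.toNat + 1 = n + 1 := by omega
      rw [this]
      calc n < n + 1 := by omega
        _ ≤ (n+1)^k := le_self_pow₀ (by omega) (by omega)

lemma iroot_unique (n : Int) (k : Nat) (r : Int) (hn : 0 ≤ n) (hk : 1 ≤ k)
    (hr : 0 ≤ r) (h1 : r ^ k ≤ n) (h2 : n < (r + 1) ^ k) : iroot n k = r := by
  obtain ⟨g0, g1, g2⟩ := iroot_spec n k hn hk
  by_contra hne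
  rcases lt_or_gt_of_ne hne with hlt | hgt
  · have : iroot n k + 1 ≤ r := by omega
    have := pow_le_pow_left₀ (by omega : (0:Int) ≤ iroot n k + 1) this k
    omega
  · have : r + 1 ≤ iroot n k := by omega
    have := pow_le_pow_left₀ (by omega : (0:Int) ≤ r + 1) this k
    omega

lemma iroot_pow_self (k : Nat) (x : Int) (hk : 1 ≤ k) (hx : 0 ≤ x) : iroot (x ^ k) k = x :=
  iroot_unique _ _ _ (pow_nonneg hx k) hk hx le_rfl
    (by have := pow_lt_pow_left₀ (by omega : x < x+1) hx (by omega : k ≠ 0); omega)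

lemma le_iroot_of_pow_le (n : Int) (k : Nat) (x : Int) (hk : 1 ≤ k) (hx : 0 ≤ x)
    (h : x ^ k ≤ n) : x ≤ iroot n k := by
  have hn : 0 ≤ n := le_trans (pow_nonneg hx k) h
  obtain ⟨g0, g1, g2⟩ := iroot_spec n k hn hk
  by_contra hgt
  push_neg at hgt
  have : iroot n k + 1 ≤ x := by omega
  have := pow_le_pow_left₀ (by omega : (0:Int) ≤ iroot n k + 1) this k
  omega

lemma iroot_neg (n : Int) (k : Nat) (h : n < 2) : iroot n k = n := by
  simp [iroot, h]

lemma mem_c_range (N c : Int) (h : c ∈ PySem.List.pyRange 1 (iroot N 3 + 1) 1) :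
    1 ≤ c ∧ c * c * c ≤ N := by
  rw [PySem.List.mem_pyRange_one] at h
  obtain ⟨h1, h2⟩ := h
  refine ⟨h1, ?_⟩
  by_cases hN : N < 2
  · rw [iroot_neg N 3 hN] at h2
    have : c = 1 ∧ N = 1 := by omega
    obtain ⟨rfl, rfl⟩ := this; norm_num
  · push_neg at hN
    obtain ⟨g0, g1, g2⟩ := iroot_spec N 3 (by omega) (by omega)
    have hc : c ≤ iroot N 3 := by omega
    calc c * c * c = c ^ 3 := by ring
      _ ≤ (iroot N 3) ^ 3 := pow_le_pow_left₀ (by omega) hc 3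
      _ ≤ N := g1

lemma foldl_cond_add (l : List Int) (g : Int → Int) (p : Int → Prop) [DecidablePred p] (a : Int) :
    l.foldl (fun acc x => if p x then acc + g x else acc) a
      = a + (l.map (fun x => if p x then g x else 0)).sum := by
  have : (fun (acc : Int) x => if p x then acc + g x else acc)
      = fun acc x => acc + (if p x then g x else 0) := by
    funext acc x; split <;> simp
  rw [this, PySem.List.foldl_add]

lemma map_sum_comm (l1 l2 : List Int) (f : Int → Int → Int) :
    (l1.map (fun a => (l2.map (f a)).sum)).sum = (l2.map (fun b => (l1.map (fun a => f a b)).sum)).sum := by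
  induction l1 with
  | nil => simp
  | cons x l1 ih =>
    simp only [List.map_cons, List.sum_cons, ih]
    rw [← PySem.List.sum_map_add_int]

lemma sum_single (l : List Int) (f : Int → Int) (c0 : Int) (h0 : c0 ∈ l) (hnd : l.Nodup)
    (hz : ∀ c ∈ l, c ≠ c0 → f c = 0) : (l.map f).sum = f c0 := by
  induction l with
  | nil => simp at h0
  | cons x l ih =>
    simp only [List.map_cons, List.sum_cons]
    rcases List.mem_cons.mp h0 with rfl | hm
    · have : ∀ c ∈ l, f c = 0 := fun c hc =>
        hz c (List.mem_cons_of_mem _ hc) (fun h => (List.nodup_cons.mp hnd).1 (h ▸ hc))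
      have : (l.map f).sum = 0 := List.sum_eq_zero (by
        intro y hy; obtain ⟨c, hc, rfl⟩ := List.mem_map.mp hy; exact this c hc)
      omega
    · have hx : f x = 0 := hz x (List.mem_cons_self) (fun h => (List.nodup_cons.mp hnd).1 (h ▸ hm))
      rw [hx, ih hm (List.nodup_cons.mp hnd).2
        (fun c hc hne => hz c (List.mem_cons_of_mem _ hc) hne)]
      omega

lemma sum_filter_not_aux (l : List Int) (p : Int → Bool) (F : Int → Int) :
    ((l.filter p).map F).sum + ((l.filter (fun b => !p b)).map F).sum = (l.map F).sum := by
  induction l with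
  | nil => simp
  | cons x l ih =>
    by_cases h : p x = true <;> simp [List.filter_cons, h] <;> omega

lemma sum_partition (keys : List Int) (l : List Int) (f : Int → Int) (F : Int → Int)
    (hnd : keys.Nodup) (hcov : ∀ b ∈ l, f b ∈ keys) :
    (keys.map (fun r => ((l.filter (fun b => f b == r)).map F).sum)).sum = (l.map F).sum := by
  induction keys generalizing l with
  | nil =>
    simp only [List.map_nil, List.sum_nil]
    have : l = [] := by
      cases l with
      | nil => rfl
      | cons x l => exact absurd (hcov x List.mem_cons_self) (by simp)
    simp [this]
  | cons r ks ih =>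
    simp only [List.map_cons, List.sum_cons]
    rw [← sum_filter_not_aux l (fun b => f b == r) F]
    have hcov' : ∀ b ∈ l.filter (fun b => !(f b == r)), f b ∈ ks := by
      intro b hb
      have hbl := List.mem_of_mem_filter hb
      have hbr : f b ≠ r := by have := (List.mem_filter.mp hb).2; simpa using this
      rcases List.mem_cons.mp (hcov b hbl) with h | h
      · exact absurd h hbr
      · exact h
    have hks := ih (l.filter (fun b => !(f b == r))) (List.nodup_cons.mp hnd).2 hcov'
    rw [← hks]
    have hmap : ∀ u ∈ ks,
        ((l.filter (fun b => f b == u)).map F).sum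
          = (((l.filter (fun b => !(f b == r))).filter (fun b => f b == u)).map F).sum := by
      intro u hu
      have hur : u ≠ r := fun h => (List.nodup_cons.mp hnd).1 (h ▸ hu)
      congr 1
      rw [List.filter_filter]
      apply congrArg
      apply List.filter_congr
      intro b _
      by_cases h : f b = u
      · simp [h, hur, Ne.symm hur]
      · simp [h]
    have := List.map_congr_left hmap
    rw [this]

lemma sum_foldl_append_if (l : List Int) (p : Int → Bool) (g : Int → List Int) (G : Int → Int)
    (acc : List Int) :
    ((l.foldl (fun acc rb => if p rb then acc ++ g rb else acc) acc).map G).sum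
      = (acc.map G).sum + (l.map (fun rb => if p rb then ((g rb).map G).sum else 0)).sum := by
  induction l generalizing acc with
  | nil => simp
  | cons x l ih =>
    simp only [List.foldl_cons, List.map_cons, List.sum_cons]
    by_cases h : p x = true
    · rw [if_pos h, ih, if_pos h]; simp; omega
    · rw [if_neg h, ih, if_neg h]; omega

lemma sum_range_shrink (z x : Int) (f : Int → Int) (hzx : z ≤ x)
    (hz : ∀ a, z ≤ a → a < x → f a = 0) :
    ((PySem.List.pyRange 1 x 1).map f).sum = ((PySem.List.pyRange 1 z 1).map f).sum := by
  by_cases h1 : 1 ≤ z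
  · rw [PySem.List.pyRange_one_append 1 z x h1 hzx, List.map_append, List.sum_append]
    have : ((PySem.List.pyRange z x 1).map f).sum = 0 := List.sum_eq_zero (by
      intro y hy
      obtain ⟨a, ha, rfl⟩ := List.mem_map.mp hy
      rw [PySem.List.mem_pyRange_one] at ha
      exact hz a ha.1 ha.2)
    omega
  · push_neg at h1
    rw [PySem.List.pyRange_one_eq_nil (by omega : z ≤ 1)]
    simp only [List.map_nil, List.sum_nil]
    apply List.sum_eq_zero
    intro y hy
    obtain ⟨a, ha, rfl⟩ := List.mem_map.mp hy
    rw [PySem.List.mem_pyRange_one] at ha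
    exact hz a (by omega) (by omega)

def p4 (x : Int) : Int := x * x * (x * x)
def fr (b : Int) : Int := PySem.Int.mod (b * b * (b * b)) 8645

def FF (N : Int) (mult : List (Int × Int)) (exc : List Int) (a b : Int) : Int :=
  if a < b ∧ p4 a + p4 b ≤ N ∧
      iroot (p4 a + p4 b) 3 * iroot (p4 a + p4 b) 3 * iroot (p4 a + p4 b) 3 = p4 a + p4 b ∧
      p4 a + p4 b ∉ exc then
    (PySem.Dict.mk mult).getD (p4 a + p4 b) 0
  else 0

def FC (N : Int) (mult : List (Int × Int)) (exc : List Int) (c a b : Int) : Int :=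
  if c * c * c = p4 a + p4 b ∧ a < b ∧ p4 a + p4 b ≤ N ∧ p4 a + p4 b ∉ exc then
    (PySem.Dict.mk mult).getD (p4 a + p4 b) 0
  else 0

def HC (mult : List (Int × Int)) (exc : List Int) (c a : Int) : Int :=
  if iroot (c * c * c - a ^ 4) 4 > a ∧ (iroot (c * c * c - a ^ 4) 4) ^ 4 = c * c * c - a ^ 4 ∧
      (c * c * c) ∉ exc then
    (PySem.Dict.mk mult).getD (c * c * c) 0
  else 0

lemma B_eq (N : Int) (mult : List (Int × Int)) (exc : List Int) :
    count_e4_cubes_only_alt N mult exc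
      = ((PySem.List.pyRange 1 (iroot N 3 + 1) 1).map (fun c =>
          ((PySem.List.pyRange 1 (iroot (c * c * c - 1) 4 + 1) 1).map (fun a =>
            HC mult exc c a)).sum)).sum := by
  unfold count_e4_cubes_only_alt
  have hinner : ∀ (c t : Int),
      (PySem.List.pyRange 1 (iroot (c * c * c - 1) 4 + 1) 1).foldl
        (fun total a =>
          if iroot (c * c * c - a ^ 4) 4 > a ∧ (iroot (c * c * c - a ^ 4) 4) ^ 4 = c * c * c - a ^ 4 ∧
              (c * c * c) ∉ exc then total + (PySem.Dict.mk mult).getD (c * c * c) 0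
          else total) t
      = t + ((PySem.List.pyRange 1 (iroot (c * c * c - 1) 4 + 1) 1).map (fun a => HC mult exc c a)).sum := by
    intro c t
    rw [foldl_cond_add]
    rfl
  have : (fun (total : Int) c =>
      (PySem.List.pyRange 1 (iroot (c * c * c - 1) 4 + 1) 1).foldl
        (fun total a =>
          if iroot (c * c * c - a ^ 4) 4 > a ∧ (iroot (c * c * c - a ^ 4) 4) ^ 4 = c * c * c - a ^ 4 ∧
              (c * c * c) ∉ exc then total + (PySem.Dict.mk mult).getD (c * c * c) 0
          else total) total)
      = (fun (total : Int) c => total + ((PySem.List.pyRange 1 (iroot (c * c * c - 1) 4 + 1) 1).map (fun a => HC mult exc c a)).sum) := by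
    funext t c; exact hinner c t
  calc (PySem.List.pyRange 1 (iroot N 3 + 1) 1).foldl _ 0
      = (PySem.List.pyRange 1 (iroot N 3 + 1) 1).foldl
          (fun (total : Int) c => total + ((PySem.List.pyRange 1 (iroot (c * c * c - 1) 4 + 1) 1).map (fun a => HC mult exc c a)).sum) 0 := by
        rw [← this]
    _ = _ := by rw [PySem.List.foldl_add]; simp

lemma pow_inj_nonneg (c t : Int) (k : Nat) (hk : k ≠ 0) (hc : 0 ≤ c) (ht : 0 ≤ t)
    (h : c ^ k = t ^ k) : c = t := by
  by_contra hne
  rcases lt_or_gt_of_ne hne with hlt | hgt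
  · have := pow_lt_pow_left₀ hlt hc hk; omega
  · have := pow_lt_pow_left₀ hgt ht hk; omega

lemma p4_eq_pow (x : Int) : p4 x = x ^ 4 := by unfold p4; ring

lemma FF_eq_sum_FC (N : Int) (mult : List (Int × Int)) (exc : List Int) (a b : Int)
    (ha : 1 ≤ a) (hb : 1 ≤ b) :
    FF N mult exc a b = ((PySem.List.pyRange 1 (iroot N 3 + 1) 1).map (fun c => FC N mult exc c a b)).sum := by
  have hs2 : 2 ≤ p4 a + p4 b := by
    have h1 : 1 ≤ p4 a := by rw [p4_eq_pow]; calc (1:Int) = 1^4 := by norm_num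
                                                _ ≤ a^4 := pow_le_pow_left₀ (by omega) ha 4
    have h2 : 1 ≤ p4 b := by rw [p4_eq_pow]; calc (1:Int) = 1^4 := by norm_num
                                                _ ≤ b^4 := pow_le_pow_left₀ (by omega) hb 4
    omega
  by_cases hFF : a < b ∧ p4 a + p4 b ≤ N ∧
      iroot (p4 a + p4 b) 3 * iroot (p4 a + p4 b) 3 * iroot (p4 a + p4 b) 3 = p4 a + p4 b ∧
      p4 a + p4 b ∉ exc
  · obtain ⟨hab, hN, hcube, hexc⟩ := hFF
    set s := p4 a + p4 b with hs
    set t := iroot s 3 with hts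
    have ht0 : 0 ≤ t := (iroot_spec s 3 (by omega) (by omega)).1
    have ht1 : 1 ≤ t := by
      rcases eq_or_lt_of_le ht0 with h | h
      · exfalso; rw [← h] at hcube; omega
      · omega
    have htmem : t ∈ PySem.List.pyRange 1 (iroot N 3 + 1) 1 := by
      rw [PySem.List.mem_pyRange_one]
      refine ⟨ht1, ?_⟩
      have : t ≤ iroot N 3 := le_iroot_of_pow_le N 3 t (by omega) ht0 (by nlinarith [hcube])
      omega
    rw [sum_single _ _ t htmem (PySem.List.nodup_pyRange_one _ _)]
    · unfold FC FF
      rw [← hs]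
      rw [if_pos ⟨hab, hN, hcube, hexc⟩, if_pos ⟨by nlinarith [hcube], hab, hN, hexc⟩]
    · intro c hcm hne
      rw [PySem.List.mem_pyRange_one] at hcm
      unfold FC
      rw [if_neg]
      rintro ⟨hcc, -, -, -⟩
      exact hne (pow_inj_nonneg c t 3 (by omega) (by omega) ht0 (by nlinarith [hcube]))
  · unfold FF
    rw [if_neg hFF]
    symm
    apply List.sum_eq_zero
    intro y hy
    obtain ⟨c, hcm, rfl⟩ := List.mem_map.mp hy
    rw [PySem.List.mem_pyRange_one] at hcm
    unfold FC
    rw [if_neg]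
    rintro ⟨hcc, hab, hN, hexc⟩
    apply hFF
    refine ⟨hab, hN, ?_, hexc⟩
    have : iroot (p4 a + p4 b) 3 = c := by
      rw [← hcc]
      have : c * c * c = c ^ 3 := by ring
      rw [this]
      exact iroot_pow_self 3 c (by omega) (by omega)
    rw [this]; omega

lemma sum_FC_eq_HC (N : Int) (mult : List (Int × Int)) (exc : List Int) (c a : Int)
    (hc : 1 ≤ c) (hcN : c * c * c ≤ N) (ha : 1 ≤ a) :
    ((PySem.List.pyRange 1 (iroot N 4 + 1) 1).map (fun b => FC N mult exc c a b)).sum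
      = HC mult exc c a := by
  have ha4 : 1 ≤ a ^ 4 := by
    calc (1:Int) = 1^4 := by norm_num
      _ ≤ a^4 := pow_le_pow_left₀ (by omega) ha 4
  by_cases hHC : iroot (c * c * c - a ^ 4) 4 > a ∧ (iroot (c * c * c - a ^ 4) 4) ^ 4 = c * c * c - a ^ 4 ∧
      (c * c * c) ∉ exc
  · obtain ⟨hba, hb4, hexc⟩ := hHC
    set b0 := iroot (c * c * c - a ^ 4) 4 with hb0
    have hb00 : 1 ≤ b0 := by omega
    have hrem : 0 ≤ c * c * c - a ^ 4 := by
      rw [← hb4]; positivity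
    have hmem : b0 ∈ PySem.List.pyRange 1 (iroot N 4 + 1) 1 := by
      rw [PySem.List.mem_pyRange_one]
      refine ⟨hb00, ?_⟩
      have : b0 ≤ iroot N 4 := le_iroot_of_pow_le N 4 b0 (by omega) (by omega) (by omega)
      omega
    rw [sum_single _ _ b0 hmem (PySem.List.nodup_pyRange_one _ _)]
    · unfold FC HC
      rw [if_pos]
      · rw [if_pos ⟨hba, hb4, hexc⟩]
        congr 1
        rw [p4_eq_pow, p4_eq_pow]; omega
      · refine ⟨by rw [p4_eq_pow, p4_eq_pow]; omega, hba, by rw [p4_eq_pow, p4_eq_pow]; omega, ?_⟩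
        have : p4 a + p4 b0 = c * c * c := by rw [p4_eq_pow, p4_eq_pow]; omega
        rw [this]; exact hexc
    · intro b hbm hne
      rw [PySem.List.mem_pyRange_one] at hbm
      unfold FC
      rw [if_neg]
      rintro ⟨hcc, -, -, -⟩
      rw [p4_eq_pow, p4_eq_pow] at hcc
      exact hne (pow_inj_nonneg b b0 4 (by omega) (by omega) (by omega) (by omega))
  · unfold HC
    rw [if_neg hHC]
    apply List.sum_eq_zero
    intro y hy
    obtain ⟨b, hbm, rfl⟩ := List.mem_map.mp hy
    rw [PySem.List.mem_pyRange_one] at hbm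
    unfold FC
    rw [if_neg]
    rintro ⟨hcc, hab, hN, hexc⟩
    rw [p4_eq_pow, p4_eq_pow] at hcc hexc
    apply hHC
    have hib : iroot (c * c * c - a ^ 4) 4 = b := by
      have : c * c * c - a ^ 4 = b ^ 4 := by omega
      rw [this]
      exact iroot_pow_self 4 b (by omega) (by omega)
    rw [hib]
    exact ⟨hab, by omega, by have : a ^ 4 + b ^ 4 = c * c * c := by omega
                             rw [← this]; exact hexc⟩

lemma HC_zero_of_a_large (mult : List (Int × Int)) (exc : List Int) (c a : Int)
    (ha : 1 ≤ a) (h : c * c * c ≤ a ^ 4) : HC mult exc c a = 0 := by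
  unfold HC
  rw [if_neg]
  rintro ⟨hba, -, -⟩
  rw [iroot_neg _ _ (by omega)] at hba
  omega

lemma HC_zero_of_b_large (N : Int) (mult : List (Int × Int)) (exc : List Int) (c a : Int)
    (hc : 1 ≤ c) (hcN : c * c * c ≤ N) (ha : 1 ≤ a) (h : iroot N 4 ≤ a) :
    HC mult exc c a = 0 := by
  unfold HC
  rw [if_neg]
  rintro ⟨hba, hb4, -⟩
  have ha4 : 1 ≤ a ^ 4 := by
    calc (1:Int) = 1^4 := by norm_num
      _ ≤ a^4 := pow_le_pow_left₀ (by omega) ha 4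
  have : iroot (c * c * c - a ^ 4) 4 ≤ iroot N 4 :=
    le_iroot_of_pow_le N 4 _ (by omega) (by omega) (by omega)
  omega

lemma B_eq_zero_of_small (N : Int) (mult : List (Int × Int)) (exc : List Int)
    (h : iroot N 4 < 2) : count_e4_cubes_only_alt N mult exc = 0 := by
  rw [B_eq]
  apply List.sum_eq_zero
  intro y hy
  obtain ⟨c, hcm, rfl⟩ := List.mem_map.mp hy
  obtain ⟨hc1, hcN⟩ := mem_c_range N c hcm
  apply List.sum_eq_zero
  intro z hz
  obtain ⟨a, ham, rfl⟩ := List.mem_map.mp hz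
  rw [PySem.List.mem_pyRange_one] at ham
  unfold HC
  rw [if_neg]
  rintro ⟨hba, hb4, -⟩
  have ha1 : 1 ≤ a := ham.1
  have hb2 : 2 ≤ iroot (c * c * c - a ^ 4) 4 := by omega
  have h16 : (16:Int) ≤ (iroot (c * c * c - a ^ 4) 4) ^ 4 := by
    calc (16:Int) = 2^4 := by norm_num
      _ ≤ _ := pow_le_pow_left₀ (by omega) hb2 4
  have ha4 : 1 ≤ a ^ 4 := by
    calc (1:Int) = 1^4 := by norm_num
      _ ≤ a^4 := pow_le_pow_left₀ (by omega) ha1 4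
  have hN17 : 17 ≤ N := by omega
  have : 2 ≤ iroot N 4 := le_iroot_of_pow_le N 4 2 (by omega) (by omega) (by norm_num; omega)
  omega
-- ==== array-fold infrastructure ====
lemma pyGetD_pySetD_int {α : Type} (xs : List α) (i j : Int) (v d : α)
    (hi0 : 0 ≤ i) (hil : i < xs.length) (hj : 0 ≤ j) :
    PySem.List.pyGetD (PySem.List.pySetD xs i v) j d = if j = i then v else PySem.List.pyGetD xs j d := by
  have h1 : i = (i.toNat : Int) := by omega
  have h2 : j = (j.toNat : Int) := by omega
  rw [h1, h2, PySem.List.pyGetD_pySetD_natCast xs i.toNat j.toNat v d (by omega)]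
  by_cases h : j.toNat = i.toNat
  · rw [if_pos h, if_pos (by omega : (j.toNat : Int) = (i.toNat : Int))]
  · rw [if_neg h, if_neg (by omega : ¬ (j.toNat : Int) = (i.toNat : Int))]

lemma foldl_pySetD_getD_nm {α : Type} (l : List Int) (g : Int → α) (init : List α) (j : Int) (d : α)
    (hj : ∀ b ∈ l, b ≠ j) (hval : ∀ b ∈ l, 0 ≤ b ∧ b < init.length) (hj0 : 0 ≤ j) :
    PySem.List.pyGetD (l.foldl (fun arr b => PySem.List.pySetD arr b (g b)) init) j d
      = PySem.List.pyGetD init j d := by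
  induction l generalizing init with
  | nil => rfl
  | cons b l ih =>
    simp only [List.foldl_cons]
    rw [ih _ (fun x hx => hj x (List.mem_cons_of_mem _ hx))
        (by intro x hx
            have := hval x (List.mem_cons_of_mem _ hx)
            rwa [PySem.List.length_pySetD])]
    rw [pyGetD_pySetD_int init b j (g b) d (hval b List.mem_cons_self).1
        (hval b List.mem_cons_self).2 hj0]
    rw [if_neg (fun h => hj b List.mem_cons_self h.symm)]

lemma foldl_pySetD_getD {α : Type} (l : List Int) (g : Int → α) (init : List α) (j : Int) (d : α)
    (hnd : l.Nodup) (hval : ∀ b ∈ l, 0 ≤ b ∧ b < init.length) (hj : j ∈ l) :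
    PySem.List.pyGetD (l.foldl (fun arr b => PySem.List.pySetD arr b (g b)) init) j d = g j := by
  induction l generalizing init with
  | nil => simp at hj
  | cons b l ih =>
    simp only [List.foldl_cons]
    rcases List.mem_cons.mp hj with rfl | hm
    · rw [foldl_pySetD_getD_nm l g _ j d
        (fun x hx h => (List.nodup_cons.mp hnd).1 (h ▸ hx))
        (by intro x hx
            have := hval x (List.mem_cons_of_mem _ hx)
            rwa [PySem.List.length_pySetD]) (hval j List.mem_cons_self).1]
      rw [pyGetD_pySetD_int init j j (g j) d (hval j List.mem_cons_self).1
        (hval j List.mem_cons_self).2 (hval j List.mem_cons_self).1, if_pos rfl]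
    · exact ih _ (List.nodup_cons.mp hnd).2
        (by intro x hx
            have := hval x (List.mem_cons_of_mem _ hx)
            rwa [PySem.List.length_pySetD]) hm

lemma foldl_setTrue_pres (l : List Int) (g : Int → Int) (init : List Bool) (x : Int)
    (hval : ∀ i ∈ l, 0 ≤ g i ∧ g i < init.length) (hx0 : 0 ≤ x)
    (hx : PySem.List.pyGetD init x false = true) :
    PySem.List.pyGetD (l.foldl (fun cb i => PySem.List.pySetD cb (g i) true) init) x false = true := by
  induction l generalizing init with
  | nil => exact hx
  | cons i l ih =>
    simp only [List.foldl_cons]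
    apply ih
    · intro y hy
      have := hval y (List.mem_cons_of_mem _ hy)
      rwa [PySem.List.length_pySetD]
    · rw [pyGetD_pySetD_int init (g i) x true false (hval i List.mem_cons_self).1
        (hval i List.mem_cons_self).2 hx0]
      split
      · rfl
      · exact hx

lemma foldl_setTrue_mem (l : List Int) (g : Int → Int) (init : List Bool) (j : Int)
    (hval : ∀ i ∈ l, 0 ≤ g i ∧ g i < init.length) (hj : j ∈ l) :
    PySem.List.pyGetD (l.foldl (fun cb i => PySem.List.pySetD cb (g i) true) init) (g j) false = true := by
  induction l generalizing init with
  | nil => simp at hj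
  | cons i l ih =>
    simp only [List.foldl_cons]
    rcases List.mem_cons.mp hj with rfl | hm
    · apply foldl_setTrue_pres
      · intro y hy
        have := hval y (List.mem_cons_of_mem _ hy)
        rwa [PySem.List.length_pySetD]
      · exact (hval j List.mem_cons_self).1
      · rw [pyGetD_pySetD_int init (g j) (g j) true false (hval j List.mem_cons_self).1
          (hval j List.mem_cons_self).2 (hval j List.mem_cons_self).1, if_pos rfl]
    · apply ih
      · intro y hy
        have := hval y (List.mem_cons_of_mem _ hy)
        rwa [PySem.List.length_pySetD]
      · exact hm

lemma foldl_prod3 {α β γ : Type} (l : List Int) (f : α → Int → α) (g : β → Int → β)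
    (h : γ → Int → γ) (a : α) (b : β) (c : γ) :
    l.foldl (fun st x => (f st.1 x, g st.2.1 x, h st.2.2 x)) (a, b, c)
      = (l.foldl f a, l.foldl g b, l.foldl h c) := by
  induction l generalizing a b c with
  | nil => rfl
  | cons x l ih => simp only [List.foldl_cons]; exact ih (f a x) (g b x) (h c x)
-- ==== characterizations of A's helpers ====
lemma aCubeBool_true (i : Int) (hi : i ∈ PySem.List.pyRange 0 8645 1) :
    PySem.List.pyGetD aCubeBool (PySem.Int.powMod i 3 8645) false = true := by
  unfold aCubeBool
  apply foldl_setTrue_mem _ _ _ i _ hi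
  intro x _
  unfold PySem.Int.powMod
  constructor
  · exact PySem.Int.mod_nonneg _ (by norm_num)
  · have := PySem.Int.mod_lt (x ^ 3) (by norm_num : (0:Int) < 8645)
    simp only [List.length_replicate]
    omega

lemma mod_eq_emod_8645 (x : Int) : PySem.Int.mod x 8645 = x % 8645 :=
  PySem.Int.mod_eq_emod_of_pos (by norm_num)

lemma pass_of_cube (a b : Int) (ha : 1 ≤ a) (hb : 1 ≤ b)
    (hcube : iroot (p4 a + p4 b) 3 * iroot (p4 a + p4 b) 3 * iroot (p4 a + p4 b) 3 = p4 a + p4 b) :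
    PySem.List.pyGetD aCubeBool (PySem.Int.mod (fr a + fr b) 8645) false = true := by
  have hs0 : 0 ≤ p4 a + p4 b := by
    have h1 : 0 ≤ p4 a := by rw [p4_eq_pow]; positivity
    have h2 : 0 ≤ p4 b := by rw [p4_eq_pow]; positivity
    omega
  set c := iroot (p4 a + p4 b) 3 with hc
  set i := PySem.Int.mod c 8645 with hi
  have him : i ∈ PySem.List.pyRange 0 8645 1 := by
    rw [PySem.List.mem_pyRange_one]
    exact ⟨PySem.Int.mod_nonneg _ (by norm_num), PySem.Int.mod_lt c (by norm_num : (0:Int) < 8645)⟩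
  have hidx : PySem.Int.mod (fr a + fr b) 8645 = PySem.Int.powMod i 3 8645 := by
    unfold PySem.Int.powMod
    rw [hi]
    unfold fr
    rw [mod_eq_emod_8645, mod_eq_emod_8645, mod_eq_emod_8645, mod_eq_emod_8645,
        mod_eq_emod_8645]
    have h1 : (a * a * (a * a)) = p4 a := rfl
    have h2 : (b * b * (b * b)) = p4 b := rfl
    rw [h1, h2]
    have h4 : c ^ 3 = p4 a + p4 b := by nlinarith [hcube]
    rw [show (c % 8645) ^ 3 = (c % 8645) * (c % 8645) * (c % 8645) from by ring]
    have h3 : (c % 8645) * (c % 8645) * (c % 8645) % 8645 = c * c * c % 8645 := by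
      simp [Int.mul_emod]
    rw [h3]
    have h5 : c * c * c = p4 a + p4 b := by nlinarith [h4]
    rw [h5]
    rw [← Int.add_emod]
  rw [hidx]
  exact aCubeBool_true i him

lemma aStB_eq (L : Int) :
    aStB L = ((PySem.List.pyRange 1 (L + 1) 1).foldl
        (fun arr b => PySem.List.pySetD arr b (b * b * (b * b))) (List.replicate (L + 1).toNat 0),
      (PySem.List.pyRange 1 (L + 1) 1).foldl
        (fun d b => d.modify (PySem.Int.mod (b * b * (b * b)) 8645) [] (fun bs => bs ++ [b]))
        PySem.Dict.empty,
      (PySem.List.pyRange 1 (L + 1) 1).foldl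
        (fun s b => PySem.Set.add s (PySem.Int.mod (b * b * (b * b)) 8645)) PySem.Set.empty) := by
  unfold aStB
  exact foldl_prod3 (PySem.List.pyRange 1 (L + 1) 1)
    (fun arr b => PySem.List.pySetD arr b (b * b * (b * b)))
    (fun d b => PySem.Dict.modify d (PySem.Int.mod (b * b * (b * b)) 8645) [] (fun bs => bs ++ [b]))
    (fun s b => PySem.Set.add s (PySem.Int.mod (b * b * (b * b)) 8645)) _ _ _

lemma aStA_eq (L : Int) :
    aStA L = ((PySem.List.pyRange 1 (L + 1) 1).foldl
        (fun arr a => PySem.List.pySetD arr a (a * a * (a * a))) (List.replicate (L + 1).toNat 0),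
      (PySem.List.pyRange 1 (L + 1) 1).foldl
        (fun arr a => PySem.List.pySetD arr a (PySem.Int.mod (a * a * (a * a)) 8645))
        (List.replicate (L + 1).toNat 0),
      (PySem.List.pyRange 1 (L + 1) 1).foldl
        (fun s a => PySem.Set.add s (PySem.Int.mod (a * a * (a * a)) 8645)) PySem.Set.empty) := by
  unfold aStA
  exact foldl_prod3 (PySem.List.pyRange 1 (L + 1) 1)
    (fun arr a => PySem.List.pySetD arr a (a * a * (a * a)))
    (fun arr a => PySem.List.pySetD arr a (PySem.Int.mod (a * a * (a * a)) 8645))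
    (fun s a => PySem.Set.add s (PySem.Int.mod (a * a * (a * a)) 8645)) _ _ _

lemma range_val (L x : Int) (hx : x ∈ PySem.List.pyRange 1 (L + 1) 1) :
    0 ≤ x ∧ x < (List.replicate (L + 1).toNat (0 : Int)).length := by
  rw [PySem.List.mem_pyRange_one] at hx
  simp only [List.length_replicate]
  omega

lemma aStB_b4 (L b : Int) (hb : b ∈ PySem.List.pyRange 1 (L + 1) 1) :
    PySem.List.pyGetD (aStB L).1 b 0 = p4 b := by
  rw [aStB_eq]
  exact foldl_pySetD_getD _ _ _ _ _ (PySem.List.nodup_pyRange_one _ _) (range_val L) hb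

lemma aStA_a4 (L a : Int) (ha : a ∈ PySem.List.pyRange 1 (L + 1) 1) :
    PySem.List.pyGetD (aStA L).1 a 0 = p4 a := by
  rw [aStA_eq]
  exact foldl_pySetD_getD _ _ _ _ _ (PySem.List.nodup_pyRange_one _ _) (range_val L) ha

lemma aStA_ares (L a : Int) (ha : a ∈ PySem.List.pyRange 1 (L + 1) 1) :
    PySem.List.pyGetD (aStA L).2.1 a 0 = fr a := by
  rw [aStA_eq]
  exact foldl_pySetD_getD _ _ _ _ _ (PySem.List.nodup_pyRange_one _ _) (range_val L) ha

lemma aStB_dict (L r : Int) :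
    (aStB L).2.1.getD r [] = (PySem.List.pyRange 1 (L + 1) 1).filter (fun b => fr b == r) := by
  rw [aStB_eq]
  show ((PySem.List.pyRange 1 (L + 1) 1).foldl
      (fun d b => d.modify (fr b) [] (fun bs => bs ++ [b])) PySem.Dict.empty).getD r [] = _
  rw [show ((PySem.List.pyRange 1 (L + 1) 1).foldl
      (fun d b => d.modify (fr b) [] (fun bs => bs ++ [b])) PySem.Dict.empty)
      = (((PySem.List.pyRange 1 (L + 1) 1).map (fun b => ((fr b, b) : Int × Int))).foldl
          (fun d p => d.modify p.1 [] (fun bs => bs ++ [p.2])) PySem.Dict.empty) from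
    (List.foldl_map (f := fun b => ((fr b, b) : Int × Int))
      (g := fun d p => PySem.Dict.modify d p.1 [] (fun bs => bs ++ [p.2]))
      (l := PySem.List.pyRange 1 (L + 1) 1) (init := PySem.Dict.empty)).symm]
  rw [PySem.Dict.getD_foldl_modify_append]
  rw [PySem.Dict.getD_empty]
  rw [List.filter_map, List.map_map]
  simp [Function.comp_def]

lemma aStB_present_mem (L e : Int) :
    e ∈ ((aStB L).2.2 : PySem.Set Int) ↔ ∃ b ∈ PySem.List.pyRange 1 (L + 1) 1, fr b = e := by
  rw [aStB_eq]
  show e ∈ (PySem.List.pyRange 1 (L + 1) 1).foldl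
      (fun s b => PySem.Set.add s (fr b)) PySem.Set.empty ↔ _
  rw [PySem.Set.mem_foldl_add]
  constructor
  · rintro (h | ⟨b, hb, rfl⟩)
    · simp [PySem.Set.empty] at h
    · exact ⟨b, hb, rfl⟩
  · rintro ⟨b, hb, rfl⟩
    exact Or.inr ⟨b, hb, rfl⟩

lemma aStB_present_nodup (L : Int) : ((aStB L).2.2 : PySem.Set Int).Nodup := by
  rw [aStB_eq]
  show ((PySem.List.pyRange 1 (L + 1) 1).foldl
      (fun s b => PySem.Set.add s (fr b)) PySem.Set.empty).Nodup
  rw [← PySem.Set.update_map_eq_foldl_add]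
  exact PySem.Set.nodup_update _ _ (by simp [PySem.Set.empty])

lemma aStA_occ_mem (L e : Int) :
    e ∈ ((aStA L).2.2 : PySem.Set Int) ↔ ∃ a ∈ PySem.List.pyRange 1 (L + 1) 1, fr a = e := by
  rw [aStA_eq]
  show e ∈ (PySem.List.pyRange 1 (L + 1) 1).foldl
      (fun s a => PySem.Set.add s (fr a)) PySem.Set.empty ↔ _
  rw [PySem.Set.mem_foldl_add]
  constructor
  · rintro (h | ⟨a, ha, rfl⟩)
    · simp [PySem.Set.empty] at h
    · exact ⟨a, ha, rfl⟩
  · rintro ⟨a, ha, rfl⟩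
    exact Or.inr ⟨a, ha, rfl⟩

lemma aStA_occ_nodup (L : Int) : ((aStA L).2.2 : PySem.Set Int).Nodup := by
  rw [aStA_eq]
  show ((PySem.List.pyRange 1 (L + 1) 1).foldl
      (fun s a => PySem.Set.add s (fr a)) PySem.Set.empty).Nodup
  rw [← PySem.Set.update_map_eq_foldl_add]
  exact PySem.Set.nodup_update _ _ (by simp [PySem.Set.empty])

lemma aCandDict_getD (cb : List Bool) (rtb : PySem.Dict Int (List Int)) (present : List Int)
    (r4occ : List Int) (hnd : r4occ.Nodup) (ra : Int) (hra : ra ∈ r4occ) :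
    (aCandDict cb rtb present r4occ).getD ra [] = aCand cb rtb present ra := by
  unfold aCandDict
  have hitems : (r4occ.foldl (fun d x => d.insert x (aCand cb rtb present x)) PySem.Dict.empty).items
      = PySem.Dict.empty.items ++ r4occ.map (fun x => (x, aCand cb rtb present x)) := by
    apply PySem.Dict.items_foldl_insert_fresh
    · intro x _; exact PySem.Dict.contains_empty x
    · simpa using hnd
  apply PySem.Dict.getD_of_mem_items
  · rw [hitems]
    simp only [List.mem_append, List.mem_map]
    exact Or.inr ⟨ra, hra, rfl⟩
  · exact PySem.Dict.nodup_keys_foldl_insert _ _ _ (by simp [PySem.Dict.empty])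

lemma foldl_translation (l : List Int) (step : Int → Int → Int) (δ : Int → Int)
    (h : ∀ t x, step t x = t + δ x) (t : Int) :
    l.foldl step t = t + (l.map δ).sum := by
  induction l generalizing t with
  | nil => simp
  | cons x l ih =>
    simp only [List.foldl_cons, List.map_cons, List.sum_cons]
    rw [ih (step t x), h t x]
    ring

lemma step_eq_FF (N : Int) (mult : List (Int × Int)) (exc : List Int) (a b : Int)
    (ha : 1 ≤ a) (hb : 1 ≤ b) :
    (if PySem.List.pyGetD aCubeBool (PySem.Int.mod (fr a + fr b) 8645) false = true then
      (if b ≤ a then (0:Int) else if p4 a + p4 b > N then 0 else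
        if iroot (p4 a + p4 b) 3 * iroot (p4 a + p4 b) 3 * iroot (p4 a + p4 b) 3 = p4 a + p4 b ∧
            p4 a + p4 b ∉ exc then (PySem.Dict.mk mult).getD (p4 a + p4 b) 0 else 0)
     else 0) = FF N mult exc a b := by
  unfold FF
  by_cases hcu : iroot (p4 a + p4 b) 3 * iroot (p4 a + p4 b) 3 * iroot (p4 a + p4 b) 3 = p4 a + p4 b
  · rw [if_pos (pass_of_cube a b ha hb hcu)]
    by_cases hab : b ≤ a
    · rw [if_pos hab, if_neg (fun hcon => absurd hcon.1 (by omega))]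
    · by_cases hsN : p4 a + p4 b > N
      · rw [if_neg hab, if_pos hsN, if_neg (fun hcon => absurd hcon.2.1 (by omega))]
      · by_cases hexc : p4 a + p4 b ∈ exc
        · rw [if_neg hab, if_neg hsN, if_neg (fun h => h.2 hexc),
            if_neg (fun h => h.2.2.2 hexc)]
        · rw [if_neg hab, if_neg hsN, if_pos ⟨hcu, hexc⟩,
            if_pos ⟨by omega, by omega, hcu, hexc⟩]
  · conv_rhs => rw [if_neg (fun h => hcu h.2.2.1)]
    split_ifs with hp h1 h2 h3
    · rfl
    · rfl
    · exact absurd h3.1 hcu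
    · rfl
    · rfl

lemma mem_up (L x : Int) (hx : x ∈ PySem.List.pyRange 1 L 1) :
    x ∈ PySem.List.pyRange 1 (L + 1) 1 := by
  rw [PySem.List.mem_pyRange_one] at hx ⊢
  omega

lemma aTotal_eq (N : Int) (mult : List (Int × Int)) (exc : List Int) (L : Int) :
    aTotal N mult exc (aStA L).1 (aStA L).2.1 (aStB L).1
      (aCandDict aCubeBool (aStB L).2.1
        (PySem.List.sorted ((aStB L).2.2 : PySem.Set Int) (fun x => x) false) (aStA L).2.2) L
      = ((PySem.List.pyRange 1 L 1).map (fun a =>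
          ((PySem.List.pyRange 1 (L + 1) 1).map (fun b => FF N mult exc a b)).sum)).sum := by
  have h1 : aTotal N mult exc (aStA L).1 (aStA L).2.1 (aStB L).1
      (aCandDict aCubeBool (aStB L).2.1
        (PySem.List.sorted ((aStB L).2.2 : PySem.Set Int) (fun x => x) false) (aStA L).2.2) L
      = 0 + ((PySem.List.pyRange 1 L 1).map (fun a =>
          (((aCandDict aCubeBool (aStB L).2.1
              (PySem.List.sorted ((aStB L).2.2 : PySem.Set Int) (fun x => x) false)
              (aStA L).2.2).getD (PySem.List.pyGetD (aStA L).2.1 a 0) []).map (fun b =>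
            if b ≤ a then (0:Int)
            else if PySem.List.pyGetD (aStA L).1 a 0 + PySem.List.pyGetD (aStB L).1 b 0 > N then 0
            else if iroot (PySem.List.pyGetD (aStA L).1 a 0 + PySem.List.pyGetD (aStB L).1 b 0) 3 *
                  iroot (PySem.List.pyGetD (aStA L).1 a 0 + PySem.List.pyGetD (aStB L).1 b 0) 3 *
                  iroot (PySem.List.pyGetD (aStA L).1 a 0 + PySem.List.pyGetD (aStB L).1 b 0) 3 =
                  PySem.List.pyGetD (aStA L).1 a 0 + PySem.List.pyGetD (aStB L).1 b 0 ∧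
                PySem.List.pyGetD (aStA L).1 a 0 + PySem.List.pyGetD (aStB L).1 b 0 ∉ exc then
              (PySem.Dict.mk mult).getD
                (PySem.List.pyGetD (aStA L).1 a 0 + PySem.List.pyGetD (aStB L).1 b 0) 0
            else 0)).sum)).sum := by
    apply foldl_translation
    intro t a
    apply foldl_translation
    intro t' b
    dsimp only
    split_ifs <;> omega
  rw [h1, zero_add]
  apply congrArg
  apply List.map_congr_left
  intro a ha
  have ha' : a ∈ PySem.List.pyRange 1 (L + 1) 1 := mem_up L a ha
  have ha1 : 1 ≤ a := (PySem.List.mem_pyRange_one.mp ha).1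
  rw [aStA_ares L a ha', aStA_a4 L a ha']
  rw [aCandDict_getD _ _ _ _ (aStA_occ_nodup L) (fr a)
    ((aStA_occ_mem L (fr a)).mpr ⟨a, ha', rfl⟩)]
  unfold aCand
  rw [sum_foldl_append_if]
  simp only [List.map_nil, List.sum_nil, zero_add]
  have hstep2 : ∀ rb ∈ PySem.List.sorted ((aStB L).2.2 : PySem.Set Int) (fun x => x) false,
      (if PySem.List.pyGetD aCubeBool (PySem.Int.mod (fr a + rb) 8645) false = true then
        (((aStB L).2.1.getD rb []).map (fun b =>
          if b ≤ a then (0:Int)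
          else if p4 a + PySem.List.pyGetD (aStB L).1 b 0 > N then 0
          else if iroot (p4 a + PySem.List.pyGetD (aStB L).1 b 0) 3 *
                iroot (p4 a + PySem.List.pyGetD (aStB L).1 b 0) 3 *
                iroot (p4 a + PySem.List.pyGetD (aStB L).1 b 0) 3 =
                p4 a + PySem.List.pyGetD (aStB L).1 b 0 ∧
              p4 a + PySem.List.pyGetD (aStB L).1 b 0 ∉ exc then
            (PySem.Dict.mk mult).getD (p4 a + PySem.List.pyGetD (aStB L).1 b 0) 0
          else 0)).sum
       else 0)
      = (((PySem.List.pyRange 1 (L + 1) 1).filter (fun b => fr b == rb)).map (fun b =>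
          if PySem.List.pyGetD aCubeBool (PySem.Int.mod (fr a + fr b) 8645) false = true then
            (if b ≤ a then (0:Int)
             else if p4 a + PySem.List.pyGetD (aStB L).1 b 0 > N then 0
             else if iroot (p4 a + PySem.List.pyGetD (aStB L).1 b 0) 3 *
                   iroot (p4 a + PySem.List.pyGetD (aStB L).1 b 0) 3 *
                   iroot (p4 a + PySem.List.pyGetD (aStB L).1 b 0) 3 =
                   p4 a + PySem.List.pyGetD (aStB L).1 b 0 ∧
                 p4 a + PySem.List.pyGetD (aStB L).1 b 0 ∉ exc then
               (PySem.Dict.mk mult).getD (p4 a + PySem.List.pyGetD (aStB L).1 b 0) 0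
             else 0)
          else 0)).sum := by
    intro rb _
    rw [aStB_dict L rb]
    by_cases hp : PySem.List.pyGetD aCubeBool (PySem.Int.mod (fr a + rb) 8645) false = true
    · rw [if_pos hp]
      apply congrArg
      apply List.map_congr_left
      intro b hbf
      have hfrb : fr b = rb := by
        have := (List.mem_filter.mp hbf).2
        simpa using this
      rw [hfrb, if_pos hp]
    · rw [if_neg hp]
      symm
      apply List.sum_eq_zero
      intro y hy
      obtain ⟨b, hbf, rfl⟩ := List.mem_map.mp hy
      have hfrb : fr b = rb := by
        have := (List.mem_filter.mp hbf).2
        simpa using this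
      rw [hfrb, if_neg hp]
  rw [List.map_congr_left hstep2]
  rw [sum_partition _ _ fr _
    (((PySem.List.sorted_perm ((aStB L).2.2 : PySem.Set Int) (fun x => x) false)).symm.nodup
      (aStB_present_nodup L))
    (fun b hb => (PySem.List.mem_sorted _ _ _ _).mpr
      ((aStB_present_mem L (fr b)).mpr ⟨b, hb, rfl⟩))]
  apply congrArg
  apply List.map_congr_left
  intro b hb
  have hb1 : 1 ≤ b := (PySem.List.mem_pyRange_one.mp hb).1
  rw [aStB_b4 L b hb]
  exact step_eq_FF N mult exc a b ha1 hb1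

lemma A_eq (N : Int) (mult : List (Int × Int)) (exc : List Int) (h : ¬ iroot N 4 < 2) :
    count_e4_cubes_only N mult exc
      = ((PySem.List.pyRange 1 (iroot N 4) 1).map (fun a =>
          ((PySem.List.pyRange 1 (iroot N 4 + 1) 1).map (fun b => FF N mult exc a b)).sum)).sum := by
  simp only [count_e4_cubes_only]
  rw [if_neg h]
  exact aTotal_eq N mult exc (iroot N 4)

theorem count_e4_cubes_only_spec' : ∀ (N : Int) (mult : List (Int × Int)) (excluded : List Int),
    count_e4_cubes_only N mult excluded = count_e4_cubes_only_alt N mult excluded := by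
  intro N mult exc
  by_cases h : iroot N 4 < 2
  · rw [B_eq_zero_of_small N mult exc h]
    simp only [count_e4_cubes_only]
    rw [if_pos h]
  · rw [A_eq N mult exc h, B_eq]
    have hL : 2 ≤ iroot N 4 := by omega
    calc ((PySem.List.pyRange 1 (iroot N 4) 1).map (fun a =>
            ((PySem.List.pyRange 1 (iroot N 4 + 1) 1).map (fun b => FF N mult exc a b)).sum)).sum
        = ((PySem.List.pyRange 1 (iroot N 4) 1).map (fun a =>
            ((PySem.List.pyRange 1 (iroot N 4 + 1) 1).map (fun b =>
              ((PySem.List.pyRange 1 (iroot N 3 + 1) 1).map (fun c => FC N mult exc c a b)).sum)).sum)).sum := by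
          apply congrArg
          apply List.map_congr_left
          intro a ha
          apply congrArg
          apply List.map_congr_left
          intro b hb
          exact FF_eq_sum_FC N mult exc a b (PySem.List.mem_pyRange_one.mp ha).1
            (PySem.List.mem_pyRange_one.mp hb).1
      _ = ((PySem.List.pyRange 1 (iroot N 4) 1).map (fun a =>
            ((PySem.List.pyRange 1 (iroot N 3 + 1) 1).map (fun c =>
              ((PySem.List.pyRange 1 (iroot N 4 + 1) 1).map (fun b => FC N mult exc c a b)).sum)).sum)).sum := by
          apply congrArg
          apply List.map_congr_left
          intro a _
          exact map_sum_comm (PySem.List.pyRange 1 (iroot N 4 + 1) 1)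
            (PySem.List.pyRange 1 (iroot N 3 + 1) 1) (fun b c => FC N mult exc c a b)
      _ = ((PySem.List.pyRange 1 (iroot N 3 + 1) 1).map (fun c =>
            ((PySem.List.pyRange 1 (iroot N 4) 1).map (fun a =>
              ((PySem.List.pyRange 1 (iroot N 4 + 1) 1).map (fun b => FC N mult exc c a b)).sum)).sum)).sum :=
          map_sum_comm (PySem.List.pyRange 1 (iroot N 4) 1)
            (PySem.List.pyRange 1 (iroot N 3 + 1) 1)
            (fun a c => ((PySem.List.pyRange 1 (iroot N 4 + 1) 1).map (fun b => FC N mult exc c a b)).sum)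
      _ = ((PySem.List.pyRange 1 (iroot N 3 + 1) 1).map (fun c =>
            ((PySem.List.pyRange 1 (iroot N 4) 1).map (fun a => HC mult exc c a)).sum)).sum := by
          apply congrArg
          apply List.map_congr_left
          intro c hc
          obtain ⟨hc1, hcN⟩ := mem_c_range N c hc
          apply congrArg
          apply List.map_congr_left
          intro a ha
          exact sum_FC_eq_HC N mult exc c a hc1 hcN (PySem.List.mem_pyRange_one.mp ha).1
      _ = ((PySem.List.pyRange 1 (iroot N 3 + 1) 1).map (fun c =>
            ((PySem.List.pyRange 1 (iroot (c * c * c - 1) 4 + 1) 1).map (fun a =>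
              HC mult exc c a)).sum)).sum := by
          apply congrArg
          apply List.map_congr_left
          intro c hc
          obtain ⟨hc1, hcN⟩ := mem_c_range N c hc
          have hc30 : 0 ≤ c * c * c - 1 := by nlinarith
          obtain ⟨hA0, hA1, hA2⟩ := iroot_spec (c * c * c - 1) 4 hc30 (by omega)
          set z := min (iroot N 4) (iroot (c * c * c - 1) 4 + 1) with hz
          have hz1 : 1 ≤ z := by omega
          have hzeroA : ∀ a, z ≤ a → a < iroot N 4 → HC mult exc c a = 0 := by
            intro a haz haL
            have hAc : iroot (c * c * c - 1) 4 + 1 ≤ a := by omega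
            apply HC_zero_of_a_large mult exc c a (by omega)
            have : (iroot (c * c * c - 1) 4 + 1) ^ 4 ≤ a ^ 4 :=
              pow_le_pow_left₀ (by omega) hAc 4
            omega
          have hzeroB : ∀ a, z ≤ a → a < iroot (c * c * c - 1) 4 + 1 → HC mult exc c a = 0 := by
            intro a haz haA
            have hLa : iroot N 4 ≤ a := by omega
            exact HC_zero_of_b_large N mult exc c a hc1 hcN (by omega) hLa
          rw [sum_range_shrink z (iroot N 4) _ (min_le_left _ _) hzeroA,
            ← sum_range_shrink z (iroot (c * c * c - 1) 4 + 1) _ (min_le_right _ _) hzeroB]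

-- ===== VERDICT (by name: the statement is the Claim_ definition above) =====
theorem count_e4_cubes_only_spec : Claim_equal_count_e4_cubes_only := by
  intro N mult excluded _
  unfold Spec_count_e4_cubes_only
  exact count_e4_cubes_only_spec' N mult excluded
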